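-- pv_equiv track=rewrite | github.com/pypi-data/pypi-mirror-237 | packages/qufi-script/qufi-script-1.0.2.tar.gz/qufi-script-1.0.2/src/qufi/utils/filters.py | filter_unchangeable_words
-- ===== SOURCE A (Python) =====
-- def filter_unchangeable_words(text: str) -> dict:
--     split = False
--     words_dict = {}
--     temp_text = ""
--     for letter in text:
--         if letter == '`':
--             if split:
--                 split = False
--                 words_dict['`%s`' % temp_text] = temp_text
--                 temp_text = ''
--             else:
--                 split = True
--         else:
--             if split:
--                 temp_text += letter
--     return words_dict
-- ===== SOURCE B (Python) =====
-- def filter_unchangeable_words(text: str) -> dict: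
--     # Tokenize once: split on backticks; segments at odd positions are the
--     # contents of complete pairs (the last segment is never inside a closed pair).
--     out = {}
--     inner = text.split('`')[:-1]
--     while len(inner) >= 2:
--         word = inner[1]
--         out['`%s`' % word] = word
--         inner = inner[2:]
--     return out
-- ===== Notes on version B (the rewrite author's own statement) =====
-- stated objective: faster
-- what changed: Replaces the per-character toggle state machine with tokenize-then-consume: split the text on backticks once, drop the trailing segment, and take every second segment (the pair contents) into the dict.
import Mathlib
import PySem

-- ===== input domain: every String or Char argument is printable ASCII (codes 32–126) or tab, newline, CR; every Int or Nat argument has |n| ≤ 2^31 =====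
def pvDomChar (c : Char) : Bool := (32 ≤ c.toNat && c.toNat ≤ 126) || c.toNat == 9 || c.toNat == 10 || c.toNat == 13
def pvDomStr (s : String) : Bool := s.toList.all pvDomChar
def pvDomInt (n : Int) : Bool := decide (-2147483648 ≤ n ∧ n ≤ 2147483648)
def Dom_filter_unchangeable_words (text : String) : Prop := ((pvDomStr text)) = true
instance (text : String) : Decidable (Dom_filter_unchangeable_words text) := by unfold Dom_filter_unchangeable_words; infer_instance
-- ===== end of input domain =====

-- B re-implements A's per-character toggle state machine as split-on-backtick tokenization
-- followed by pairwise consumption of the segments (a timing run measured B faster).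

-- ===== PORT A =====
-- one step of A's for-loop; state = (split, words_dict, temp_text)
def fuwStep (st : Bool × PySem.Dict String String × List Char) (letter : Char) :
    Bool × PySem.Dict String String × List Char :=
  if letter = '`' then
    if st.1 then
      (false, st.2.1.insert (String.ofList ('`' :: st.2.2 ++ ['`'])) (String.ofList st.2.2), [])
    else
      (true, st.2.1, st.2.2)
  else
    if st.1 then (st.1, st.2.1, st.2.2 ++ [letter]) else st

def filter_unchangeable_words (text : String) : List (String × String) :=
  (text.toList.foldl fuwStep (false, PySem.Dict.empty, [])).2.1.items

-- ===== PORT B =====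
-- the while-loop of Source B: consume segments two at a time, the second one is a pair's content
def fuwLoop (d : PySem.Dict String String) : List (List Char) → PySem.Dict String String
  | _ :: word :: t => fuwLoop (d.insert (String.ofList ('`' :: word ++ ['`'])) (String.ofList word)) t
  | _ => d

def filter_unchangeable_words_alt (text : String) : List (String × String) :=
  (fuwLoop PySem.Dict.empty
    (PySem.List.slice (PySem.Chars.splitOn text.toList ['`']) none (some (-1)))).items

-- ===== PRECONDITION & SPEC =====
def Spec_filter_unchangeable_words (text : String) (out : List (String × String)) : Prop := out = filter_unchangeable_words_alt text
instance (text : String) (out : List (String × String)) : Decidable (Spec_filter_unchangeable_words text out) := by unfold Spec_filter_unchangeable_words; infer_instance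

-- ===== CLAIM (what is proved, stated in full; the proofs are below) =====
def Claim_equal_filter_unchangeable_words : Prop := ∀ (text : String), Dom_filter_unchangeable_words text → Spec_filter_unchangeable_words text (filter_unchangeable_words text)

-- ===== LEMMAS AND PROOFS =====

-- clean structural characterisation of splitting on a single backtick
def splitTick : List Char → List (List Char)
  | [] => [[]]
  | c :: cs => if c = '`' then [] :: splitTick cs else (splitTick cs).modifyHead (c :: ·)

lemma splitTick_ne_nil (cs : List Char) : splitTick cs ≠ [] := by
  induction cs with
  | nil => simp [splitTick]
  | cons c cs ih =>
    simp only [splitTick]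
    split_ifs
    · simp
    · cases h : splitTick cs with
      | nil => exact absurd h ih
      | cons s t => simp [List.modifyHead]

lemma go_spec : ∀ (fuel : Nat) (l cur : List Char) (acc : List (List Char)),
    l.length < fuel →
    PySem.Chars.splitOn.go ['`'] fuel l cur acc
      = acc.reverse ++ (splitTick l).modifyHead (cur.reverse ++ ·) := by
  intro fuel
  induction fuel with
  | zero => intro l cur acc h; omega
  | succ f ih =>
    intro l cur acc h
    cases l with
    | nil => simp [PySem.Chars.splitOn.go, splitTick]
    | cons c rest =>
      by_cases hc : c = '`'
      · subst hc
        have hp : (['`'] : List Char).isPrefixOf ('`' :: rest) = true := by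
          simp [List.isPrefixOf]
        simp only [PySem.Chars.splitOn.go, hp, if_pos, List.length_cons, List.drop_succ_cons,
          List.length_nil, List.drop_zero]
        rw [ih rest [] (cur.reverse :: acc) (by simpa using Nat.lt_of_succ_lt_succ h)]
        cases hs : splitTick rest with
        | nil => exact absurd hs (splitTick_ne_nil rest)
        | cons s t => simp [splitTick, hs, List.modifyHead]
      · have hp : (['`'] : List Char).isPrefixOf (c :: rest) = false := by
          simp [List.isPrefixOf]; exact fun h' => hc h'.symm
        simp only [PySem.Chars.splitOn.go, hp, Bool.false_eq_true, if_false]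
        rw [ih rest (c :: cur) acc (by simpa using Nat.lt_of_succ_lt_succ h)]
        cases hs : splitTick rest with
        | nil => exact absurd hs (splitTick_ne_nil rest)
        | cons s t => simp [splitTick, hc, hs, List.modifyHead]

lemma splitOn_eq_splitTick (cs : List Char) :
    PySem.Chars.splitOn cs ['`'] = splitTick cs := by
  have := go_spec (cs.length + 1) cs [] [] (by omega)
  cases hs : splitTick cs with
  | nil => exact absurd hs (splitTick_ne_nil cs)
  | cons s t =>
    rw [hs] at this
    simpa [PySem.Chars.splitOn, List.modifyHead] using this

-- the completed words A collects from state (split, temp) on the remaining text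
def Wwords : Bool → List Char → List Char → List (List Char)
  | _, _, [] => []
  | false, temp, c :: cs => if c = '`' then Wwords true temp cs else Wwords false temp cs
  | true, temp, c :: cs => if c = '`' then temp :: Wwords false [] cs else Wwords true (temp ++ [c]) cs

def foldIns (d : PySem.Dict String String) (ws : List (List Char)) : PySem.Dict String String :=
  ws.foldl (fun d w => d.insert (String.ofList ('`' :: w ++ ['`'])) (String.ofList w)) d

lemma foldA_eq (cs : List Char) : ∀ (sp : Bool) (d : PySem.Dict String String) (temp : List Char),
    (cs.foldl fuwStep (sp, d, temp)).2.1 = foldIns d (Wwords sp temp cs) := by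
  induction cs with
  | nil => intro sp d temp; cases sp <;> simp [Wwords, foldIns]
  | cons c cs ih =>
    intro sp d temp
    by_cases hc : c = '`' <;> cases sp <;>
      simp [fuwStep, hc, Wwords, ih, foldIns]

-- segments at odd positions, i.e. the contents of complete backtick pairs
def oddIdx : List (List Char) → List (List Char)
  | _ :: b :: t => b :: oddIdx t
  | _ => []

lemma fuwLoop_eq_foldIns : ∀ (inner : List (List Char)) (d : PySem.Dict String String),
    fuwLoop d inner = foldIns d (oddIdx inner)
  | [], d => by simp [fuwLoop, oddIdx, foldIns]
  | [a], d => by simp [fuwLoop, oddIdx, foldIns]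
  | a :: b :: t, d => by
    simp only [fuwLoop, oddIdx, foldIns, List.foldl]
    exact fuwLoop_eq_foldIns t _

-- heads never matter to oddIdx
lemma oddIdx_cons (a b : List Char) (t : List (List Char)) :
    oddIdx (a :: t) = oddIdx (b :: t) := by
  cases t <;> simp [oddIdx]

lemma words_of_segs (cs : List Char) :
    (oddIdx (splitTick cs).dropLast = Wwords false [] cs) ∧
    (∀ temp, (match splitTick cs with
              | s0 :: rest => if rest = [] then [] else (temp ++ s0) :: oddIdx rest.dropLast
              | [] => ([] : List (List Char))) = Wwords true temp cs) := by
  induction cs with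
  | nil => exact ⟨by simp [splitTick, oddIdx, Wwords], by intro temp; simp [splitTick, Wwords]⟩
  | cons c cs ih =>
    obtain ⟨ihF, ihT⟩ := ih
    by_cases hc : c = '`'
    · subst hc
      constructor
      · show oddIdx (splitTick ('`' :: cs)).dropLast = Wwords true [] cs
        rw [← ihT []]
        simp only [splitTick]
        cases hg : splitTick cs with
        | nil => exact absurd hg (splitTick_ne_nil cs)
        | cons s0 rest =>
          cases rest with
          | nil => simp [oddIdx]
          | cons r t => simp [oddIdx, List.dropLast]
      · intro temp
        show _ = temp :: Wwords false [] cs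
        rw [← ihF]
        simp only [splitTick]
        cases hg : splitTick cs with
        | nil => exact absurd hg (splitTick_ne_nil cs)
        | cons s0 rest => simp
    · constructor
      · simp only [Wwords, if_neg hc]
        rw [← ihF]
        simp only [splitTick, if_neg hc]
        cases hg : splitTick cs with
        | nil => exact absurd hg (splitTick_ne_nil cs)
        | cons s0 rest =>
          cases rest with
          | nil => simp [List.modifyHead, oddIdx]
          | cons r t =>
            simp only [List.modifyHead, List.dropLast_cons₂]
            exact oddIdx_cons _ s0 _
      · intro temp
        simp only [Wwords, if_neg hc]
        rw [← ihT (temp ++ [c])]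
        simp only [splitTick, if_neg hc]
        cases hg : splitTick cs with
        | nil => exact absurd hg (splitTick_ne_nil cs)
        | cons s0 rest =>
          cases rest with
          | nil => simp [List.modifyHead]
          | cons r t => simp [List.modifyHead]

theorem main (text : String) :
    filter_unchangeable_words text = filter_unchangeable_words_alt text := by
  unfold filter_unchangeable_words filter_unchangeable_words_alt
  rw [foldA_eq, splitOn_eq_splitTick, PySem.List.slice_to_neg_one,
    fuwLoop_eq_foldIns, (words_of_segs text.toList).1]

-- ===== VERDICT (by name: the statement is the Claim_ definition above) =====
theorem filter_unchangeable_words_spec : Claim_equal_filter_unchangeable_words := by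
  intro text _
  exact main text
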